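-- pv_equiv track=rewrite | github.com/E-Ranee/Advent-of-Code | AoC 2024/Day 7/day_7.py | will_it_calibrate
-- ===== SOURCE A (Python) =====
-- from itertools import product
--
-- def will_it_calibrate(target_value, list_of_ints, part2=False):
--     number_of_operators = 3 if part2 else 2
--     operators = list(product(range(number_of_operators), repeat = len(list_of_ints) - 1))
--     # product makes a list of tuples showing all the possible permuations with replacement of the operators (eg + +, + x, x +, x x)
--     # makes one operation per gap between numbers
--     # 0 is add, 1 is multiply, 2 is concatonate
--     for order_of_operations in operators: # eg (1,1,1)
--         total = list_of_ints[0]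
--         for i in range(len(list_of_ints)-1): # iterate through numbers in list applying the operators
--             if order_of_operations[i] == 0:
--                 total = total + list_of_ints[i+1]
--             elif order_of_operations[i] == 1:
--                 total = total * list_of_ints[i+1]
--             else:
--                 total = int( str(total) + str(list_of_ints[i+1]) )
--
--             if total > target_value:
--                 break
--
--         if total == target_value:
--             return target_value
--
--     return 0 # no variation worked
-- ===== SOURCE B (Python) =====
-- def will_it_calibrate(target_value, list_of_ints, part2=False):
--     # Breadth-first over the set of distinct reachable totals, pruning any
--     # total exceeding the target (just as A's break does); no operator-tuple
--     # enumeration at all.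
--     reachable = {list_of_ints[0]}
--     for x in list_of_ints[1:]:
--         nxt = set()
--         for r in reachable:
--             cands = (r + x, r * x, int(str(r) + str(x))) if part2 else (r + x, r * x)
--             for v in cands:
--                 if v <= target_value:
--                     nxt.add(v)
--         reachable = nxt
--     return target_value if target_value in reachable else 0
-- ===== Notes on version B (the rewrite author's own statement) =====
-- stated objective: faster
-- what changed: A enumerates all k^(n-1) operator tuples via itertools.product and re-evaluates each from scratch; B does one left-to-right pass keeping the deduplicated set of reachable totals (pruned at > target exactly where A's break prunes), so shared prefixes and equal totals are computed once.
-- outside the precondition, e.g. on will_it_calibrate(3, [5, -2], True): A returns 3, B raises ValueError; on will_it_calibrate(5, [], False): A raises ValueError, B raises IndexError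
import Mathlib
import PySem

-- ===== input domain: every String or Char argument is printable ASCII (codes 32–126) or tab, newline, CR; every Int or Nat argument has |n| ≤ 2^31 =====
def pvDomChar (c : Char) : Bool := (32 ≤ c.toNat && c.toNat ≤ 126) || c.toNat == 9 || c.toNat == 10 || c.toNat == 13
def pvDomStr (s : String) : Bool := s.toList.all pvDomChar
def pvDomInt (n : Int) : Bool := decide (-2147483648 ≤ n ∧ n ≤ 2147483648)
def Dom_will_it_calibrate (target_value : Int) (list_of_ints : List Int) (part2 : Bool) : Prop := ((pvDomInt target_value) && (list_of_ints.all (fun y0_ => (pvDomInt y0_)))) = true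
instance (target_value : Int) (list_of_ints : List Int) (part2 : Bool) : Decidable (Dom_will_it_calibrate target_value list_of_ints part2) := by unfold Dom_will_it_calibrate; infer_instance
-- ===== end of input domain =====

-- B replaces A's full enumeration of operator tuples by one pass over a deduplicated
-- set of reachable totals (same > target pruning as A's break), avoiding the exponential tuple list.

-- ===== PORT A =====
-- int(str(t) + str(x)) — Python's concatenation step, exact via PySem (used verbatim by both
-- Pythons); getD 0 is never taken under Pre_ (x ≥ 0 there, so parsing succeeds).
def pyCat (t x : Int) : Int :=
  (PySem.Int.ofChars? (PySem.Int.toChars t ++ PySem.Int.toChars x)).getD 0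

-- itertools.product(range(k), repeat=n), lexicographic
def pyProduct (k : Nat) : Nat → List (List Nat)
  | 0 => [[]]
  | n + 1 => (List.range k).flatMap (fun o => (pyProduct k n).map (o :: ·))

-- inner for-loop of A, with its `if total > target: break`
def evalA (target : Int) (total : Int) : List (Nat × Int) → Int
  | [] => total
  | (o, x) :: rest =>
      let t := if o = 0 then total + x else if o = 1 then total * x else pyCat total x
      if t > target then t else evalA target t rest

-- outer for-loop of A: first tuple whose evaluation hits the target returns it
def loopA (target : Int) (x0 : Int) (tail : List Int) : List (List Nat) → Int
  | [] => 0
  | ops :: rest =>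
      if evalA target x0 (ops.zip tail) = target then target
      else loopA target x0 tail rest

def will_it_calibrate (target_value : Int) (list_of_ints : List Int) (part2 : Bool) : Int :=
  let number_of_operators : Nat := if part2 then 3 else 2
  match list_of_ints with
  | [] => 0  -- Python raises ValueError here (product with repeat=-1); excluded by Pre_
  | x0 :: tail => loopA target_value x0 tail (pyProduct number_of_operators tail.length)

-- ===== PORT B =====
def candsB (part2 : Bool) (r x : Int) : List Int :=
  if part2 then [r + x, r * x, pyCat r x] else [r + x, r * x]

-- one step of B: all candidates from every reachable total, kept only when ≤ target
def stepB (target : Int) (part2 : Bool) (S : PySem.Set Int) (x : Int) : PySem.Set Int :=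
  S.foldl
    (fun nxt r =>
      (candsB part2 r x).foldl
        (fun nxt v => if v ≤ target then PySem.Set.add nxt v else nxt) nxt)
    PySem.Set.empty

def will_it_calibrate_alt (target_value : Int) (list_of_ints : List Int) (part2 : Bool) : Int :=
  match list_of_ints with
  | [] => 0  -- Source B raises IndexError here; excluded by Pre_
  | x0 :: tail =>
      let reachable := tail.foldl (stepB target_value part2) (PySem.Set.ofList [x0])
      if reachable.contains target_value then target_value else 0

-- ===== PRECONDITION & SPEC =====
-- Pre_ excludes the empty list (A raises ValueError) and, for part2, lists with a negative
-- element after the head (int(str(t)+str(x)) raises ValueError whenever such a concatenation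
-- is reached; on the few such inputs where A returns early before reaching one, B itself raises).
def Pre_will_it_calibrate (target_value : Int) (list_of_ints : List Int) (part2 : Bool) : Prop :=
  list_of_ints ≠ [] ∧ (part2 = true → ∀ x ∈ list_of_ints.tail, 0 ≤ x)
instance (target_value : Int) (list_of_ints : List Int) (part2 : Bool) : Decidable (Pre_will_it_calibrate target_value list_of_ints part2) := by unfold Pre_will_it_calibrate; infer_instance

def pvWitness_will_it_calibrate : Int × List Int × Bool := (6, [2, 3], false)

def Spec_will_it_calibrate (target_value : Int) (list_of_ints : List Int) (part2 : Bool) (out : Int) : Prop := out = will_it_calibrate_alt target_value list_of_ints part2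
instance (target_value : Int) (list_of_ints : List Int) (part2 : Bool) (out : Int) : Decidable (Spec_will_it_calibrate target_value list_of_ints part2 out) := by unfold Spec_will_it_calibrate; infer_instance

-- ===== CLAIM (what is proved, stated in full; the proofs are below) =====
def Claim_equal_will_it_calibrate : Prop := ∀ (target_value : Int) (list_of_ints : List Int) (part2 : Bool), Dom_will_it_calibrate target_value list_of_ints part2 → Pre_will_it_calibrate target_value list_of_ints part2 → Spec_will_it_calibrate target_value list_of_ints part2 (will_it_calibrate target_value list_of_ints part2)

-- ===== LEMMAS AND PROOFS =====

-- A's outer loop returns target iff some tuple evaluates to it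
theorem loopA_eq (target x0 : Int) (tail : List Int) (L : List (List Nat)) :
    loopA target x0 tail L =
      if (∃ ops ∈ L, evalA target x0 (ops.zip tail) = target) then target else 0 := by
  induction L with
  | nil => simp [loopA]
  | cons ops rest ih =>
      simp only [loopA, ih]
      by_cases h : evalA target x0 (ops.zip tail) = target
      · simp [h]
      · rw [if_neg h]
        have hiff : (∃ o ∈ ops :: rest, evalA target x0 (o.zip tail) = target) ↔
            (∃ o ∈ rest, evalA target x0 (o.zip tail) = target) := by
          simp only [List.mem_cons]
          constructor
          · rintro ⟨o, (rfl | ho), he⟩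
            exacts [absurd he h, ⟨o, ho, he⟩]
          · rintro ⟨o, ho, he⟩
            exact ⟨o, Or.inr ho, he⟩
        exact (if_congr hiff rfl rfl).symm

-- membership in candsB = result of one of A's operator branches, o < k
theorem mem_candsB (part2 : Bool) (r x v : Int) :
    v ∈ candsB part2 r x ↔
      ∃ o, o < (if part2 then 3 else 2) ∧
        v = (if o = 0 then r + x else if o = 1 then r * x else pyCat r x) := by
  cases part2 <;> simp only [candsB, if_false, if_true, Bool.false_eq_true,
    List.mem_cons, List.not_mem_nil, or_false] <;> constructor
  · rintro (rfl | rfl)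
    exacts [⟨0, by omega, by simp⟩, ⟨1, by omega, by simp⟩]
  · rintro ⟨o, ho, rfl⟩
    interval_cases o <;> simp
  · rintro (rfl | rfl | rfl)
    exacts [⟨0, by omega, by simp⟩, ⟨1, by omega, by simp⟩, ⟨2, by omega, by simp⟩]
  · rintro ⟨o, ho, rfl⟩
    interval_cases o <;> simp

-- membership in the inner foldl of stepB
theorem mem_inner_fold (target : Int) (cs : List Int) (acc : PySem.Set Int) (v : Int) :
    v ∈ cs.foldl (fun nxt w => if w ≤ target then PySem.Set.add nxt w else nxt) acc ↔
      v ∈ acc ∨ (v ∈ cs ∧ v ≤ target) := by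
  induction cs generalizing acc with
  | nil => simp
  | cons c cs ih =>
      simp only [List.foldl_cons, ih, List.mem_cons]
      by_cases h : c ≤ target
      · rw [if_pos h, PySem.Set.mem_add]
        constructor
        · rintro ((hv | rfl) | ⟨hc, hle⟩)
          exacts [Or.inl hv, Or.inr ⟨Or.inl rfl, h⟩, Or.inr ⟨Or.inr hc, hle⟩]
        · rintro (hv | ⟨(rfl | hc), hle⟩)
          exacts [Or.inl (Or.inl hv), Or.inl (Or.inr rfl), Or.inr ⟨hc, hle⟩]
      · rw [if_neg h]
        constructor
        · rintro (hv | ⟨hc, hle⟩)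
          exacts [Or.inl hv, Or.inr ⟨Or.inr hc, hle⟩]
        · rintro (hv | ⟨(rfl | hc), hle⟩)
          exacts [Or.inl hv, absurd hle h, Or.inr ⟨hc, hle⟩]

-- membership in stepB
theorem mem_stepB (target : Int) (part2 : Bool) (S : PySem.Set Int) (x v : Int) :
    v ∈ stepB target part2 S x ↔ v ≤ target ∧ ∃ r ∈ S, v ∈ candsB part2 r x := by
  show v ∈ (S : List Int).foldl _ PySem.Set.empty ↔ _
  have main : ∀ (l : List Int) (acc : PySem.Set Int),
      v ∈ l.foldl (fun nxt r => (candsB part2 r x).foldl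
            (fun nxt w => if w ≤ target then PySem.Set.add nxt w else nxt) nxt) acc ↔
        v ∈ acc ∨ (v ≤ target ∧ ∃ r ∈ l, v ∈ candsB part2 r x) := by
    intro l
    induction l with
    | nil => simp
    | cons r l ih =>
        intro acc
        simp only [List.foldl_cons, ih, mem_inner_fold, List.mem_cons]
        constructor
        · rintro ((hv | ⟨hc, hle⟩) | ⟨hle, r', hr', hc⟩)
          exacts [Or.inl hv, Or.inr ⟨hle, r, ⟨Or.inl rfl, hc⟩⟩,
                  Or.inr ⟨hle, r', ⟨Or.inr hr', hc⟩⟩]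
        · rintro (hv | ⟨hle, r', ⟨(rfl | hr'), hc⟩⟩)
          exacts [Or.inl (Or.inl hv), Or.inl (Or.inr ⟨hc, hle⟩), Or.inr ⟨hle, r', hr', hc⟩]
  rw [main]
  simp [PySem.Set.empty]

-- the heart: B's reachable-set fold finds target iff some operator tuple makes
-- A's break-pruned evaluation hit it, from any start set
theorem fold_stepB_eq (target : Int) (part2 : Bool) (tail : List Int) :
    ∀ S : PySem.Set Int,
      target ∈ tail.foldl (stepB target part2) S ↔
        ∃ r ∈ S, ∃ ops ∈ pyProduct (if part2 then 3 else 2) tail.length,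
          evalA target r (ops.zip tail) = target := by
  induction tail with
  | nil =>
      intro S
      simp [pyProduct, evalA]
  | cons x rest ih =>
      intro S
      simp only [List.foldl_cons, ih, List.length_cons, pyProduct, List.mem_flatMap,
        List.mem_map, List.mem_range, mem_stepB]
      constructor
      · rintro ⟨r', ⟨hle, r, hrS, hc⟩, ops, hops, he⟩
        obtain ⟨o, ho, rfl⟩ := (mem_candsB part2 r x r').mp hc
        refine ⟨r, hrS, o :: ops, ⟨o, ho, ops, hops, rfl⟩, ?_⟩
        simp only [List.zip_cons_cons, evalA]
        rw [if_neg (by omega)]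
        exact he
      · rintro ⟨r, hrS, ops', ⟨o, ho, ops, hops, rfl⟩, he⟩
        simp only [List.zip_cons_cons, evalA] at he
        set t1 := if o = 0 then r + x else if o = 1 then r * x else pyCat r x with ht1
        by_cases hgt : t1 > target
        · rw [if_pos hgt] at he; omega
        · rw [if_neg hgt] at he
          exact ⟨t1, ⟨by omega, r, hrS, (mem_candsB part2 r x t1).mpr ⟨o, ho, ht1⟩⟩,
                 ops, hops, he⟩

-- ===== VERDICT (by name: the statement is the Claim_ definition above) =====
theorem will_it_calibrate_spec : Claim_equal_will_it_calibrate := by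
  intro target xs part2 _ hpre
  unfold Spec_will_it_calibrate
  obtain ⟨hne, -⟩ := hpre
  match xs with
  | [] => exact absurd rfl hne
  | x0 :: tail =>
      show loopA target x0 tail (pyProduct (if part2 then 3 else 2) tail.length) = _
      rw [loopA_eq]
      show _ = (if (tail.foldl (stepB target part2) (PySem.Set.ofList [x0])).contains target
                then target else 0)
      by_cases h : ∃ ops ∈ pyProduct (if part2 then 3 else 2) tail.length,
          evalA target x0 (ops.zip tail) = target
      · rw [if_pos h, if_pos]
        rw [PySem.Set.contains_iff, fold_stepB_eq]
        exact ⟨x0, by simp [PySem.Set.mem_ofList], h⟩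
      · rw [if_neg h, if_neg]
        intro hc
        rw [PySem.Set.contains_iff, fold_stepB_eq] at hc
        obtain ⟨r, hr, hops⟩ := hc
        rw [PySem.Set.mem_ofList] at hr
        simp only [List.mem_singleton] at hr
        subst hr
        exact h hops
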